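-- pv_equiv track=rewrite | github.com/addddisonnnn/ChIPseq-Analysis-Pipeline | scripts/PeakOverlap.py | count_overlapping_peaks
-- ===== SOURCE A (Python) =====
-- def peaks_overlap(peak1, peak2):
--     """Check if two peaks overlap (same chr and any bp overlap)"""
--     chr1, start1, end1 = peak1
--     chr2, start2, end2 = peak2
--
--     if chr1 != chr2:
--         return False
--
--     # Check for any overlap
--     return not (end1 <= start2 or end2 <= start1)
--
-- def count_overlapping_peaks(peaks1, peaks2):
--     """Count how many peaks from peaks1 overlap with any peak in peaks2"""
--     overlapping = 0
--     for peak1 in peaks1: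
--         for peak2 in peaks2:
--             if peaks_overlap(peak1, peak2):
--                 overlapping += 1
--                 break  # Count each peak1 only once
--     return overlapping
-- ===== SOURCE B (Python) =====
-- from bisect import bisect_left
--
-- def count_overlapping_peaks(peaks1, peaks2):
--     """Count how many peaks from peaks1 overlap with any peak in peaks2.
--
--     Group peaks2 by chromosome, sort each group by start and keep a prefix
--     maximum of ends; each peak1 is then answered with one binary search."""
--     by_chr = {}
--     for chrom, start, end in peaks2:
--         by_chr.setdefault(chrom, []).append((start, end))
--     index = {}
--     for chrom, ivs in by_chr.items():
--         ivs.sort(key=lambda iv: iv[0])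
--         starts = []
--         max_ends = []
--         m = None
--         for a, b in ivs:
--             starts.append(a)
--             m = b if m is None else max(m, b)
--             max_ends.append(m)
--         index[chrom] = (starts, max_ends)
--     count = 0
--     for chrom, start, end in peaks1:
--         if chrom in index:
--             starts, max_ends = index[chrom]
--             i = bisect_left(starts, end)
--             if i > 0 and max_ends[i - 1] > start:
--                 count += 1
--     return count
-- ===== Notes on version B (the rewrite author's own statement) =====
-- stated objective: faster
-- what changed: Replaces the nested scan of peaks2 for every peak1 by a per-chromosome index of peaks2 (intervals sorted by start with a prefix maximum of ends), so each peak1 is answered by one binary search instead of a linear scan.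
import Mathlib
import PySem

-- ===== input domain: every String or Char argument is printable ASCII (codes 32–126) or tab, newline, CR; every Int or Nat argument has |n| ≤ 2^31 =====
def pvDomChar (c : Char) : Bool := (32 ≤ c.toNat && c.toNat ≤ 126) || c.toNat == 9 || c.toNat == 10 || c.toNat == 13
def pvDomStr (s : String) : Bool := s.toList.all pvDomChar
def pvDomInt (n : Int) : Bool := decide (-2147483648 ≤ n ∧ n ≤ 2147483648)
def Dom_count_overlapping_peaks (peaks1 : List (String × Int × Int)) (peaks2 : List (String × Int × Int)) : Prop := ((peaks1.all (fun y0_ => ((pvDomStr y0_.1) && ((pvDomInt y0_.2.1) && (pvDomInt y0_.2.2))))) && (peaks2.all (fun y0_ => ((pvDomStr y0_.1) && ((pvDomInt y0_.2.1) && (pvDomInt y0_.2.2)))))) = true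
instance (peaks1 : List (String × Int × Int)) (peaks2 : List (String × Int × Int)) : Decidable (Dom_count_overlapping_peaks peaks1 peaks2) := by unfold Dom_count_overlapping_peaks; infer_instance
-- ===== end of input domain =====

-- B replaces A's inner scan of peaks2 for every peak1 by a per-chromosome index of peaks2
-- (intervals sorted by start, prefix maximum of ends) queried with one binary search per peak1.

-- ===== PORT A =====
def pvOverlapA (peak1 peak2 : String × Int × Int) : Bool :=
  if peak1.1 ≠ peak2.1 then false
  else !(decide (peak1.2.2 ≤ peak2.2.1) || decide (peak2.2.2 ≤ peak1.2.1))

-- A's inner `for peak2 in peaks2 … break`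
def pvInnerA (peak1 : String × Int × Int) : List (String × Int × Int) → Int → Int
  | [], overlapping => overlapping
  | peak2 :: rest, overlapping =>
      if pvOverlapA peak1 peak2 then overlapping + 1 else pvInnerA peak1 rest overlapping

def count_overlapping_peaks (peaks1 : List (String × Int × Int)) (peaks2 : List (String × Int × Int)) : Int :=
  peaks1.foldl (fun overlapping peak1 => pvInnerA peak1 peaks2 overlapping) 0

-- ===== PORT B =====
-- Source B's starts/max_ends loop: returns (starts, prefix maxima of ends), m the running max so far
def pvBuildCols : List (Int × Int) → Option Int → List Int × List Int
  | [], _ => ([], [])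
  | iv :: rest, m =>
      let m' := match m with | none => iv.2 | some x => max x iv.2
      let p := pvBuildCols rest (some m')
      (iv.1 :: p.1, m' :: p.2)

-- Source B's grouping loop: by_chr.setdefault(chrom, []).append((start, end))  =  Dict.modify chrom [] (· ++ [(start, end)])
def pvGroupByChr (peaks2 : List (String × Int × Int)) : PySem.Dict String (List (Int × Int)) :=
  peaks2.foldl (fun d p => d.modify p.1 [] (fun l => l ++ [p.2])) PySem.Dict.empty

-- Source B's index-building loop over by_chr.items()
def pvIndexOf (byChr : PySem.Dict String (List (Int × Int))) : PySem.Dict String (List Int × List Int) :=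
  byChr.items.foldl
    (fun d p => d.insert p.1 (pvBuildCols (PySem.List.sorted p.2 (fun iv => iv.1) false) none))
    PySem.Dict.empty

def count_overlapping_peaks_alt (peaks1 : List (String × Int × Int)) (peaks2 : List (String × Int × Int)) : Int :=
  let index := pvIndexOf (pvGroupByChr peaks2)
  peaks1.foldl (fun count p =>
    if index.contains p.1 then
      let cols := index.getD p.1 ([], [])
      let i := PySem.List.bisectLeft cols.1 p.2.2
      -- max_ends[i - 1]: with 0 < i ≤ len the index is always in range, so List.getD is exact
      if 0 < i ∧ p.2.1 < cols.2.getD (i - 1) 0 then count + 1 else count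
    else count) 0

-- ===== PRECONDITION & SPEC =====
def Spec_count_overlapping_peaks (peaks1 : List (String × Int × Int)) (peaks2 : List (String × Int × Int)) (out : Int) : Prop := out = count_overlapping_peaks_alt peaks1 peaks2
instance (peaks1 : List (String × Int × Int)) (peaks2 : List (String × Int × Int)) (out : Int) : Decidable (Spec_count_overlapping_peaks peaks1 peaks2 out) := by unfold Spec_count_overlapping_peaks; infer_instance

-- ===== CLAIM (what is proved, stated in full; the proofs are below) =====
def Claim_equal_count_overlapping_peaks : Prop := ∀ (peaks1 : List (String × Int × Int)) (peaks2 : List (String × Int × Int)), Dom_count_overlapping_peaks peaks1 peaks2 → Spec_count_overlapping_peaks peaks1 peaks2 (count_overlapping_peaks peaks1 peaks2)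

-- ===== LEMMAS AND PROOFS =====

-- A's inner loop tests `any`
theorem pvInnerA_eq (peak1 : String × Int × Int) (l : List (String × Int × Int)) (acc : Int) :
    pvInnerA peak1 l acc = if l.any (fun q => pvOverlapA peak1 q) then acc + 1 else acc := by
  induction l with
  | nil => simp [pvInnerA]
  | cons q rest ih =>
      cases h : pvOverlapA peak1 q
      · simp only [pvInnerA, h, Bool.false_eq_true, if_false, ih, List.any_cons, Bool.false_or]
      · simp [pvInnerA, h]

theorem pvFoldlExt {α : Type} (f g : Int → α → Int)
    (h : ∀ a x, f a x = g a x) (l : List α) (a : Int) : l.foldl f a = l.foldl g a := by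
  induction l generalizing a with
  | nil => rfl
  | cons x xs ih => simp only [List.foldl_cons, h, ih]

theorem count_A_eq_countP (peaks1 peaks2 : List (String × Int × Int)) :
    count_overlapping_peaks peaks1 peaks2
      = (peaks1.countP (fun p => peaks2.any (fun q => pvOverlapA p q)) : Int) := by
  unfold count_overlapping_peaks
  have h : ∀ (p : String × Int × Int) (acc : Int),
      pvInnerA p peaks2 acc
        = if (fun p => peaks2.any (fun q => pvOverlapA p q)) p = true then acc + 1 else acc := by
    intro p acc; exact pvInnerA_eq p peaks2 acc
  calc peaks1.foldl (fun overlapping peak1 => pvInnerA peak1 peaks2 overlapping) 0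
      = peaks1.foldl (fun acc p =>
          if (fun p => peaks2.any (fun q => pvOverlapA p q)) p = true then acc + 1 else acc) 0 := by
        apply pvFoldlExt
        intro acc p; exact h p acc
    _ = _ := by
        rw [PySem.List.foldl_count_if]; simp

-- unpack pvOverlapA
theorem pvOverlapA_iff (p q : String × Int × Int) :
    pvOverlapA p q = true ↔ q.1 = p.1 ∧ q.2.1 < p.2.2 ∧ p.2.1 < q.2.2 := by
  unfold pvOverlapA
  by_cases h : p.1 = q.1
  · simp [h]
  · simp [h]; intro hq; exact absurd hq.symm h

-- ---- pvBuildCols facts ----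
theorem pvBuildCols_fst (l : List (Int × Int)) (m : Option Int) :
    (pvBuildCols l m).1 = l.map (fun iv => iv.1) := by
  induction l generalizing m with
  | nil => simp [pvBuildCols]
  | cons iv rest ih => simp [pvBuildCols, ih]

theorem pvBuildCols_some_getD (l : List (Int × Int)) (x : Int) (j : Nat) (s : Int)
    (hj : j < l.length) :
    (s < (pvBuildCols l (some x)).2.getD j 0
      ↔ s < x ∨ ∃ q ∈ l.take (j + 1), s < q.2) := by
  induction l generalizing x j with
  | nil => simp at hj
  | cons iv rest ih =>
      cases j with
      | zero =>
          simp [pvBuildCols, List.take_succ_cons]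
      | succ j =>
          have hj' : j < rest.length := by simpa using hj
          simp only [pvBuildCols, List.getD, List.getElem?_cons_succ]
          have := ih (max x iv.2) j hj'
          simp only [List.getD] at this
          rw [this]
          simp [List.take_succ_cons]
          constructor
          · rintro (h | h)
            · rcases (by omega : s < x ∨ s < iv.2) with h' | h'
              · exact Or.inl h'
              · exact Or.inr (Or.inl h')
            · exact Or.inr (Or.inr h)
          · rintro (h | h | h)
            · exact Or.inl (by omega)
            · exact Or.inl (by omega)
            · exact Or.inr h

theorem pvBuildCols_none_getD (l : List (Int × Int)) (j : Nat) (s : Int)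
    (hj : j < l.length) :
    (s < (pvBuildCols l none).2.getD j 0 ↔ ∃ q ∈ l.take (j + 1), s < q.2) := by
  cases l with
  | nil => simp at hj
  | cons iv rest =>
      cases j with
      | zero => simp [pvBuildCols, List.take_succ_cons]
      | succ j =>
          have hj' : j < rest.length := by simpa using hj
          simp only [pvBuildCols, List.getD, List.getElem?_cons_succ]
          have := pvBuildCols_some_getD rest iv.2 j s hj'
          simp only [List.getD] at this
          rw [this]
          simp [List.take_succ_cons]

-- ---- the binary-search query answers "does some interval of ivs overlap (s, e)" ----
theorem pvQuery_iff (ivs : List (Int × Int)) (s e : Int) :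
    (let P := pvBuildCols (PySem.List.sorted ivs (fun iv => iv.1) false) none
     let i := PySem.List.bisectLeft P.1 e
     0 < i ∧ s < P.2.getD (i - 1) 0)
    ↔ ∃ q ∈ ivs, q.1 < e ∧ s < q.2 := by
  set sl := PySem.List.sorted ivs (fun iv => iv.1) false with hsl
  set P := pvBuildCols sl none with hP
  have hfst : P.1 = sl.map (fun iv => iv.1) := pvBuildCols_fst sl none
  have hpw : P.1.Pairwise (fun a b => a ≤ b) := by
    rw [hfst]
    exact List.pairwise_map.mpr (PySem.List.sorted_pairwise ivs (fun iv => iv.1))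
  obtain ⟨hile, hlt, hge⟩ := PySem.List.bisectLeft_spec P.1 e hpw
  set i := PySem.List.bisectLeft P.1 e with hi
  have hlen : P.1.length = sl.length := by rw [hfst]; simp
  constructor
  · rintro ⟨hpos, hs⟩
    have hj : i - 1 < sl.length := by omega
    have := (pvBuildCols_none_getD sl (i - 1) s hj).mp hs
    obtain ⟨q, hqmem, hqs⟩ := this
    have hq' : q ∈ sl.take i := by
      have : i - 1 + 1 = i := by omega
      rwa [this] at hqmem
    obtain ⟨j, hjm, hjq⟩ := List.mem_take_iff_getElem.mp hq'
    have hjlen : j < sl.length := lt_of_lt_of_le hjm (by omega)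
    have hji : j < i := lt_of_lt_of_le hjm (by omega)
    have hfst_j : P.1[j]'(by omega) = q.1 := by
      simp only [hfst, List.getElem_map, hjq]
    have hqe : q.1 < e := by
      have := hlt j (by omega) hji
      rwa [hfst_j] at this
    refine ⟨q, ?_, hqe, hqs⟩
    exact (PySem.List.mem_sorted ivs (fun iv => iv.1) false q).mp (List.mem_of_mem_take hq')
  · rintro ⟨q, hqmem, hqe, hqs⟩
    have hqsl : q ∈ sl := (PySem.List.mem_sorted ivs (fun iv => iv.1) false q).mpr hqmem
    obtain ⟨j, hjlen, hjq⟩ := List.mem_iff_getElem.mp hqsl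
    have hji : j < i := by
      by_contra hc
      have := hge j (by omega) (by omega)
      have hfst_j : P.1[j]'(by omega) = q.1 := by
        simp only [hfst, List.getElem_map, hjq]
      rw [hfst_j] at this; omega
    have hpos : 0 < i := by omega
    refine ⟨hpos, ?_⟩
    have hj : i - 1 < sl.length := by omega
    rw [pvBuildCols_none_getD sl (i - 1) s hj]
    refine ⟨q, ?_, hqs⟩
    have : i - 1 + 1 = i := by omega
    rw [this]
    exact List.mem_take_iff_getElem.mpr ⟨j, by omega, hjq⟩

-- ---- the per-peak1 step of B equals A's `any` test ----
theorem pvStepB_iff (peaks2 : List (String × Int × Int)) (p : String × Int × Int) :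
    (if (pvIndexOf (pvGroupByChr peaks2)).contains p.1 then
       (0 < PySem.List.bisectLeft ((pvIndexOf (pvGroupByChr peaks2)).getD p.1 ([], [])).1 p.2.2 ∧
        p.2.1 < ((pvIndexOf (pvGroupByChr peaks2)).getD p.1 ([], [])).2.getD
          (PySem.List.bisectLeft ((pvIndexOf (pvGroupByChr peaks2)).getD p.1 ([], [])).1 p.2.2 - 1) 0 : Prop)
     else False)
    ↔ peaks2.any (fun q => pvOverlapA p q) = true := by
  set byChr : PySem.Dict String (List (Int × Int)) := pvGroupByChr peaks2 with hbc
  set F : List (Int × Int) → List Int × List Int :=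
    fun v => pvBuildCols (PySem.List.sorted v (fun iv => iv.1) false) none with hF
  set index : PySem.Dict String (List Int × List Int) := pvIndexOf byChr with hidx
  have hidx' : index = byChr.items.foldl (fun d q => d.insert q.1 (F q.2)) PySem.Dict.empty := rfl
  -- keys of the grouping dict = chromosomes of peaks2
  have hkeys : byChr.keys = PySem.Set.update (PySem.Dict.empty : PySem.Dict String (List (Int × Int))).keys (peaks2.map (fun q => q.1)) := by
    rw [hbc]
    exact PySem.Dict.keys_foldl_modify_key peaks2 (fun q => q.1) [] (fun _ q => fun l => l ++ [q.2]) PySem.Dict.empty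
  have hkeys_mem : ∀ c, c ∈ byChr.keys ↔ c ∈ peaks2.map (fun q => q.1) := by
    intro c
    rw [hkeys, PySem.Set.mem_update]
    simp [PySem.Dict.keys_empty]
  have hnodup : byChr.keys.Nodup := by
    rw [hbc]
    exact PySem.Dict.nodup_keys_foldl_modify_key peaks2 (fun q => q.1) [] _ PySem.Dict.empty
      (by simp)
  have hgetD : ∀ c, byChr.getD c [] = (peaks2.filter (fun q => q.1 == c)).map (fun q => q.2) := by
    intro c
    rw [hbc]
    show (peaks2.foldl (fun d q => d.modify q.1 [] (fun l => l ++ [q.2])) PySem.Dict.empty).getD c [] = _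
    rw [PySem.Dict.getD_foldl_modify_append peaks2 PySem.Dict.empty c]
    simp [PySem.Dict.getD_empty]
  -- index.items is byChr.items with F applied to the values
  have hitems : index.items = byChr.items.map (fun a => (a.1, F a.2)) := by
    rw [hidx']
    exact PySem.Dict.items_foldl_insert_fresh byChr.items (fun a => a.1) (fun a => F a.2)
      PySem.Dict.empty (fun a _ => PySem.Dict.contains_empty _) hnodup
  have hikeys : index.keys = byChr.keys := by
    simp only [PySem.Dict.keys, hitems]
    simp
  have hinodup : index.keys.Nodup := by rw [hikeys]; exact hnodup
  have hcontains : index.contains p.1 = decide (p.1 ∈ byChr.keys) := by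
    rw [PySem.Dict.contains_eq_decide_mem_keys, hikeys]
  by_cases hc : p.1 ∈ byChr.keys
  · -- chromosome present: the indexed query decides the overlap
    have hct' : byChr.contains p.1 = true := by
      rw [PySem.Dict.contains_eq_decide_mem_keys]; simpa using hc
    have hv : byChr.get? p.1 = some (byChr.getD p.1 []) := by
      cases hg : byChr.get? p.1 with
      | none =>
          have hfalse := (PySem.Dict.get?_eq_none_iff_contains byChr p.1).mp hg
          rw [hct'] at hfalse
          cases hfalse
      | some v =>
          rw [PySem.Dict.getD_eq_get?_getD, hg]
          rfl
    have hmemit : (p.1, byChr.getD p.1 []) ∈ byChr.items :=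
      PySem.Dict.mem_items_of_get?_eq_some byChr hv
    have hmemidx : (p.1, F (byChr.getD p.1 [])) ∈ index.items := by
      rw [hitems]
      exact List.mem_map.mpr ⟨(p.1, byChr.getD p.1 []), hmemit, rfl⟩
    have hgidx : index.getD p.1 ([], []) = F (byChr.getD p.1 []) :=
      PySem.Dict.getD_of_mem_items index hmemidx hinodup ([], [])
    have hct : index.contains p.1 = true := by rw [hcontains]; simpa using hc
    simp only [hct, if_pos, hgidx]
    rw [hF]
    rw [pvQuery_iff (byChr.getD p.1 []) p.2.1 p.2.2]
    rw [hgetD]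
    simp only [List.any_eq_true, List.mem_map, List.mem_filter]
    constructor
    · rintro ⟨iv, ⟨q, ⟨hqmem, hqc⟩, hqiv⟩, h1, h2⟩
      refine ⟨q, hqmem, ?_⟩
      rw [pvOverlapA_iff]
      subst hqiv
      exact ⟨by simpa using hqc, h1, h2⟩
    · rintro ⟨q, hqmem, hov⟩
      rw [pvOverlapA_iff] at hov
      exact ⟨q.2, ⟨q, ⟨hqmem, by simp [hov.1]⟩, rfl⟩, hov.2.1, hov.2.2⟩
  · -- chromosome absent: no peak2 shares it, both sides false
    have hct : index.contains p.1 = false := by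
      rw [hcontains]; simpa using hc
    simp only [hct]
    constructor
    · intro h; exact absurd h (by simp)
    · intro h
      exfalso
      rcases List.any_eq_true.mp h with ⟨q, hqmem, hov⟩
      rw [pvOverlapA_iff] at hov
      exact hc ((hkeys_mem p.1).mpr (List.mem_map.mpr ⟨q, hqmem, hov.1⟩))

theorem count_B_eq_countP (peaks1 peaks2 : List (String × Int × Int)) :
    count_overlapping_peaks_alt peaks1 peaks2
      = (peaks1.countP (fun p => peaks2.any (fun q => pvOverlapA p q)) : Int) := by
  unfold count_overlapping_peaks_alt
  simp only []
  set index : PySem.Dict String (List Int × List Int) := pvIndexOf (pvGroupByChr peaks2) with hidx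
  have hstep : ∀ (count : Int) (p : String × Int × Int),
      (if index.contains p.1 then
         (if 0 < PySem.List.bisectLeft (index.getD p.1 ([], [])).1 p.2.2 ∧
             p.2.1 < (index.getD p.1 ([], [])).2.getD
               (PySem.List.bisectLeft (index.getD p.1 ([], [])).1 p.2.2 - 1) 0
          then count + 1 else count)
       else count)
      = if (fun p => peaks2.any (fun q => pvOverlapA p q)) p = true then count + 1 else count := by
    intro count p
    have hiff := pvStepB_iff peaks2 p
    rw [← hidx] at hiff
    by_cases hc : index.contains p.1 = true
    · simp only [hc, if_pos] at hiff ⊢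
      by_cases hq : (0 < PySem.List.bisectLeft (index.getD p.1 ([], [])).1 p.2.2 ∧
          p.2.1 < (index.getD p.1 ([], [])).2.getD
            (PySem.List.bisectLeft (index.getD p.1 ([], [])).1 p.2.2 - 1) 0)
      · rw [if_pos hq, if_pos (hiff.mp hq)]
      · rw [if_neg hq, if_neg (fun h => hq (hiff.mpr h))]
    · simp only [Bool.not_eq_true] at hc
      simp only [hc, Bool.false_eq_true, if_false] at hiff ⊢
      rw [if_neg (fun h => (hiff.mpr h))]
  have hfold := pvFoldlExt
      (fun (count : Int) p =>
        if index.contains p.1 then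
          (if 0 < PySem.List.bisectLeft (index.getD p.1 ([], [])).1 p.2.2 ∧
              p.2.1 < (index.getD p.1 ([], [])).2.getD
                (PySem.List.bisectLeft (index.getD p.1 ([], [])).1 p.2.2 - 1) 0
           then count + 1 else count)
        else count)
      (fun (count : Int) p =>
        if (fun p => peaks2.any (fun q => pvOverlapA p q)) p = true then count + 1 else count)
      hstep peaks1 0
  rw [hfold, PySem.List.foldl_count_if]
  simp

-- ===== VERDICT (by name: the statement is the Claim_ definition above) =====
theorem count_overlapping_peaks_spec : Claim_equal_count_overlapping_peaks := by
  intro peaks1 peaks2 _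
  unfold Spec_count_overlapping_peaks
  rw [count_A_eq_countP, count_B_eq_countP]
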